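-- pv_equiv track=rewrite | github.com/shivaheidari/Opinion_Prediction | Topic_Detection/summerize_local_topics.py | add_users_topic_to_summary
-- ===== SOURCE A (Python) =====
-- def add_users_topic_to_summary(topics_list, out_dc):
--     for topic in topics_list:
--         topic = topic.strip()
--         if topic in out_dc:
--             out_dc[topic] = out_dc[topic] + 1
--         else:
--             out_dc[topic] = 1
--     return out_dc
-- ===== SOURCE B (Python) =====
-- def add_users_topic_to_summary(topics_list, out_dc):
--     # Count-per-distinct-key: strip once, dedupe preserving first occurrence,
--     # then one bulk update per distinct topic using list.count -- no per-element
--     # dict membership test or increment.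
--     ks = [t.strip() for t in topics_list]
--     for k in dict.fromkeys(ks):
--         out_dc[k] = out_dc.get(k, 0) + ks.count(k)
--     return out_dc
-- ===== Notes on version B (the rewrite author's own statement) =====
-- stated objective: alternative
-- what changed: A does a membership test and an increment of out_dc for every topic occurrence; B strips once, dedupes the stripped list preserving first occurrence, and performs a single bulk update per DISTINCT topic whose amount is obtained by scanning the list with list.count -- it trades the per-occurrence dict update for a per-distinct-key list scan, which is slower when most topics are distinct.
import Mathlib
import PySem

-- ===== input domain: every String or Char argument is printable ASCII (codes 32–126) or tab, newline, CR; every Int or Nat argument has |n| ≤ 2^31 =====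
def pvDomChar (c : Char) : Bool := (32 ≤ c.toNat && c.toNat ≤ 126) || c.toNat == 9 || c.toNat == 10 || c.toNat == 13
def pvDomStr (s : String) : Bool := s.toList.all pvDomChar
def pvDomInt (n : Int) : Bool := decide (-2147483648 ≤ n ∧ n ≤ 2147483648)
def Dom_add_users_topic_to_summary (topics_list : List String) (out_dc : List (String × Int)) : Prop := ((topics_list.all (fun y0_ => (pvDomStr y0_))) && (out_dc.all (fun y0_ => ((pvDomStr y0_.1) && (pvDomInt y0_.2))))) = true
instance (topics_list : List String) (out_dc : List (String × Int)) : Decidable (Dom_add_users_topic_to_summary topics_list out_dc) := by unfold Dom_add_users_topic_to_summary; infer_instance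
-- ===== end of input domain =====

-- B replaces A's per-occurrence membership-test/increment of out_dc by: strip once,
-- dedupe preserving first occurrence, then ONE bulk update per distinct topic whose
-- amount comes from scanning the stripped list with list.count (objective: alternative,
-- not faster -- the per-distinct-key scan is slower when most topics are distinct).
-- Both Pythons mutate out_dc in place; the claim is about the returned dict.

-- ===== PORT A =====
def add_users_topic_to_summary (topics_list : List String) (out_dc : List (String × Int)) : List (String × Int) :=
  (topics_list.foldl
    (fun d t =>
      let k := PySem.Str.strip t
      match d.get? k with
      | some v => d.insert k (v + 1)   -- topic in out_dc: out_dc[topic] = out_dc[topic] + 1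
      | none   => d.insert k 1)        -- else: out_dc[topic] = 1
    (PySem.Dict.mk out_dc)).items

-- ===== PORT B =====
def add_users_topic_to_summary_alt (topics_list : List String) (out_dc : List (String × Int)) : List (String × Int) :=
  let ks := topics_list.map PySem.Str.strip            -- ks = [t.strip() for t in topics_list]
  ((PySem.List.dedup ks).foldl                          -- for k in dict.fromkeys(ks):
    (fun d k => d.insert k (d.getD k 0 + (ks.count k : Int)))   -- out_dc[k] = out_dc.get(k,0) + ks.count(k)
    (PySem.Dict.mk out_dc)).items

-- ===== PRECONDITION & SPEC =====
-- Pre_ excludes out_dc lists with duplicate keys: such a list does not encode a Python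
-- dict (the dict collapses the duplicates before A or B ever runs).
def Pre_add_users_topic_to_summary (topics_list : List String) (out_dc : List (String × Int)) : Prop :=
  (out_dc.map Prod.fst).Nodup
instance (topics_list : List String) (out_dc : List (String × Int)) : Decidable (Pre_add_users_topic_to_summary topics_list out_dc) := by unfold Pre_add_users_topic_to_summary; infer_instance

def pvWitness_add_users_topic_to_summary : List String × (List (String × Int)) :=
  ([" a", "b", "a "], [("b", 2), ("c", 0)])

def Spec_add_users_topic_to_summary (topics_list : List String) (out_dc : List (String × Int)) (out : List (String × Int)) : Prop := out = add_users_topic_to_summary_alt topics_list out_dc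
instance (topics_list : List String) (out_dc : List (String × Int)) (out : List (String × Int)) : Decidable (Spec_add_users_topic_to_summary topics_list out_dc out) := by unfold Spec_add_users_topic_to_summary; infer_instance

-- ===== CLAIM (what is proved, stated in full; the proofs are below) =====
def Claim_equal_add_users_topic_to_summary : Prop := ∀ (topics_list : List String) (out_dc : List (String × Int)), Dom_add_users_topic_to_summary topics_list out_dc → Pre_add_users_topic_to_summary topics_list out_dc → Spec_add_users_topic_to_summary topics_list out_dc (add_users_topic_to_summary topics_list out_dc)

-- ===== LEMMAS AND PROOFS =====

-- A's branching step is the unconditional "insert getD+1" step.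
theorem stepA_eq (d : PySem.Dict String Int) (k : String) :
    (match d.get? k with
      | some v => d.insert k (v + 1)
      | none   => d.insert k 1) = d.insert k (d.getD k 0 + 1) := by
  cases hd : d.get? k <;>
    simp [PySem.Dict.getD_eq_get?_getD, hd]

-- getD after merging an items list: adds the total of the values at that key.
theorem merge_getD (l : List (String × Int)) (d : PySem.Dict String Int) (x : String) :
    (l.foldl (fun d p => d.insert p.1 (d.getD p.1 0 + p.2)) d).getD x 0
      = d.getD x 0 + ((l.filter (fun p => p.1 == x)).map Prod.snd).sum := by
  induction l generalizing d with
  | nil => simp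
  | cons p rest ih =>
      simp only [List.foldl_cons, ih, List.filter_cons]
      by_cases h : p.1 = x
      · subst h
        simp [PySem.Dict.getD_insert_self]
        ring
      · have hb : (p.1 == x) = false := by simp [h]
        rw [hb]
        simp only [Bool.false_eq_true, if_false]
        rw [PySem.Dict.getD_insert_of_ne d _ _ (Ne.symm h)]

-- on a duplicate-free list, filtering for one element gives that singleton (or nothing).
theorem filter_beq_of_nodup (l : List String) (hnd : l.Nodup) (x : String) (hx : x ∈ l) :
    l.filter (fun a => a == x) = [x] := by
  induction l with
  | nil => cases hx
  | cons a rest ih =>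
      rcases List.nodup_cons.1 hnd with ⟨ha, hrest⟩
      by_cases h : a = x
      · subst h
        have : rest.filter (fun b => b == a) = [] := by
          rw [List.filter_eq_nil_iff]
          intro b hb hba
          exact ha (by simpa [eq_of_beq hba] using hb)
        simp [this]
      · have hx' : x ∈ rest := by
          cases hx with
          | head => exact absurd rfl h
          | tail _ h' => exact h'
        have hb : (a == x) = false := by simp [h]
        simp [hb, ih hrest hx']

-- the total of the counter's values at key x is the plain count of x.
theorem counter_filter_sum (ks : List String) (x : String) :
    (((PySem.Dict.counter ks).items.filter (fun p => p.1 == x)).map Prod.snd).sum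
      = (ks.count x : Int) := by
  rw [PySem.Dict.items_counter, List.filter_map]
  have hfun : ((fun p : String × Int => p.1 == x) ∘ fun k => (k, (ks.count k : Int)))
      = fun k => k == x := rfl
  rw [hfun]
  by_cases hx : x ∈ ks
  · have hmem : x ∈ PySem.Set.ofList ks := (PySem.Set.mem_ofList ks x).2 hx
    rw [filter_beq_of_nodup _ (PySem.Set.nodup_ofList ks) x hmem]
    simp
  · have hnil : (PySem.Set.ofList ks).filter (fun k => k == x) = [] := by
      rw [List.filter_eq_nil_iff]
      intro a ha hax
      exact hx (by simpa [eq_of_beq hax] using (PySem.Set.mem_ofList ks a).1 ha)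
    rw [hnil]
    simp [List.count_eq_zero_of_not_mem hx]

theorem set_update_ofList (s : PySem.Set String) (xs : List String) :
    PySem.Set.update s (PySem.Set.ofList xs) = PySem.Set.update s xs := by
  rw [PySem.Set.update_eq_append_filter, PySem.Set.update_eq_append_filter,
    PySem.Set.ofList_ofList]

-- B's fold over the deduped keys is the merge of Counter(ks).items.
theorem foldB_eq_merge_counter (ks : List String) (d : PySem.Dict String Int) :
    (PySem.List.dedup ks).foldl
        (fun d k => d.insert k (d.getD k 0 + (ks.count k : Int))) d
      = (PySem.Dict.counter ks).items.foldl
          (fun d p => d.insert p.1 (d.getD p.1 0 + p.2)) d := by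
  rw [PySem.Dict.items_counter, List.foldl_map, PySem.List.dedup_eq_ofList]

-- ===== VERDICT (by name: the statement is the Claim_ definition above) =====
theorem add_users_topic_to_summary_spec : Claim_equal_add_users_topic_to_summary := by
  intro tl od _ hpre
  unfold Spec_add_users_topic_to_summary
  unfold add_users_topic_to_summary add_users_topic_to_summary_alt
  simp only []
  set d0 : PySem.Dict String Int := PySem.Dict.mk od with hd0
  set ks : List String := tl.map PySem.Str.strip with hks
  -- A's loop is the incr-fold over the stripped keys
  have hA : tl.foldl
      (fun d t =>
        let k := PySem.Str.strip t
        match d.get? k with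
        | some v => d.insert k (v + 1)
        | none   => d.insert k 1) d0
      = ks.foldl (fun d k => d.insert k (d.getD k 0 + 1)) d0 := by
    rw [hks, List.foldl_map]
    congr 1
    funext d t
    exact stepA_eq d (PySem.Str.strip t)
  rw [hA, foldB_eq_merge_counter]
  -- the two result dicts
  set dA : PySem.Dict String Int := ks.foldl (fun d k => d.insert k (d.getD k 0 + 1)) d0 with hdA
  set dB : PySem.Dict String Int :=
    (PySem.Dict.counter ks).items.foldl (fun d p => d.insert p.1 (d.getD p.1 0 + p.2)) d0 with hdB
  have h0 : d0.keys.Nodup := by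
    simpa [hd0, PySem.Dict.keys] using hpre
  -- same keys
  have hkeys : dA.keys = dB.keys := by
    rw [hdA, hdB, PySem.Dict.keys_foldl_insert,
      PySem.Dict.keys_foldl_insert_key ((PySem.Dict.counter ks).items) Prod.fst _ d0]
    have : (PySem.Dict.counter ks).items.map Prod.fst = PySem.Set.ofList ks := by
      have := PySem.Dict.keys_counter (xs := ks)
      simpa [PySem.Dict.keys] using this
    rw [this, set_update_ofList]
  have hndA : dA.keys.Nodup := PySem.Dict.nodup_keys_foldl_insert ks _ d0 h0
  -- same value at every key
  have hval : ∀ x : String, dA.getD x 0 = dB.getD x 0 := by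
    intro x
    rw [hdA, hdB, PySem.Dict.getD_foldl_insert_add_one, merge_getD, counter_filter_sum]
  -- hence the same items lists
  rw [PySem.Dict.items_eq_map_keys dA hndA 0,
    PySem.Dict.items_eq_map_keys dB (hkeys ▸ hndA) 0, hkeys]
  exact List.map_congr_left (fun k _ => by rw [hval k])
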